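-- pv_equiv track=rewrite | github.com/DavideDiCaprio/math | linear_algebra/matrix.py | create_identity_matrix
-- ===== SOURCE A (Python) =====
-- def create_identity_matrix(size: int) -> list[list[int]]:
--     '''
--     create identity matrix of given size
--     '''
--     matrix = []
--     for i in range(size):
--         row = []
--
--         for j in range(size):
--             if i == j:
--                 row.append(1)
--             else:
--                 row.append(0)
--
--         matrix.append(row)
--
--     return matrix
-- ===== SOURCE B (Python) =====
-- def create_identity_matrix(size: int) -> list[list[int]]:
--     '''
--     create identity matrix of given size
--     '''
--     if size <= 0:
--         return []
--     row = [1] + [0] * (size - 1)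
--     matrix = [row]
--     for _ in range(size - 1):
--         row = [0] + row[:-1]
--         matrix.append(row)
--     return matrix
-- ===== Notes on version B (the rewrite author's own statement) =====
-- stated objective: alternative
-- what changed: B generates the matrix incrementally: it builds only the first row explicitly and derives each subsequent row by rotating the previous one (prepend a 0, drop the last entry), instead of A's nested loops computing every cell with an i==j test.
import Mathlib
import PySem

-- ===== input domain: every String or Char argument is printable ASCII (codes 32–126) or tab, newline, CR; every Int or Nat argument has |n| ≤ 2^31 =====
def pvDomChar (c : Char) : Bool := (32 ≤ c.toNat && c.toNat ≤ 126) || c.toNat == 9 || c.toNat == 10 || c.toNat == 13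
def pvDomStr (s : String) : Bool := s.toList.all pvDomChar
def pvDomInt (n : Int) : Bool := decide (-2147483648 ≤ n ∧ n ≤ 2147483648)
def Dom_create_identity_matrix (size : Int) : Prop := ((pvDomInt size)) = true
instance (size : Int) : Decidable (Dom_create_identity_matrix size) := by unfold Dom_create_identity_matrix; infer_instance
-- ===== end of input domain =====

-- B builds only the first row explicitly and derives each following row by rotating the previous
-- one (prepend a 0, drop the last entry), replacing A's nested per-cell i==j loops (objective: alternative).

-- ===== PORT A =====
def create_identity_matrix (size : Int) : List (List Int) :=
  (PySem.List.pyRange 0 size 1).foldl (fun matrix i =>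
    matrix ++ [(PySem.List.pyRange 0 size 1).foldl (fun row j =>
      row ++ [if i == j then (1 : Int) else 0]) []]) []

-- ===== PORT B =====
def create_identity_matrix_alt (size : Int) : List (List Int) :=
  if size ≤ 0 then []
  else
    let row0 : List Int := 1 :: List.replicate (size - 1).toNat 0
    ((PySem.List.pyRange 0 (size - 1) 1).foldl
      (fun st _ =>
        let r := (0 : Int) :: PySem.List.slice st.2 none (some (-1))  -- [0] + row[:-1]
        (st.1 ++ [r], r))
      ([row0], row0)).1

-- ===== PRECONDITION & SPEC =====
def Spec_create_identity_matrix (size : Int) (out : List (List Int)) : Prop := out = create_identity_matrix_alt size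
instance (size : Int) (out : List (List Int)) : Decidable (Spec_create_identity_matrix size out) := by unfold Spec_create_identity_matrix; infer_instance

-- ===== CLAIM (what is proved, stated in full; the proofs are below) =====
def Claim_equal_create_identity_matrix : Prop := ∀ (size : Int), Dom_create_identity_matrix size → Spec_create_identity_matrix size (create_identity_matrix size)

-- ===== LEMMAS AND PROOFS =====

-- the rotation step of B, as a function (for stating the loop invariant)
def pvSh (r : List Int) : List Int := (0 : Int) :: PySem.List.slice r none (some (-1))

-- the canonical row: replicate with the diagonal entry set
def pvRow (n i : Nat) : List Int := (List.replicate n (0 : Int)).set i 1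

theorem pvSh_eq (r : List Int) : pvSh r = (0 : Int) :: r.dropLast := by
  have h := PySem.List.slice_to_neg_natCast (xs := r) (k := 1) (by omega)
  simp only [pvSh, Nat.cast_one] at *
  rw [h, List.dropLast_eq_take]

-- B's loop: folding the rotation step over any list appends successive rotations
theorem pvFold_sh (l : List Int) (M : List (List Int)) (r : List Int) :
    (l.foldl (fun st _ =>
        (st.1 ++ [(0 : Int) :: PySem.List.slice st.2 none (some (-1))],
         (0 : Int) :: PySem.List.slice st.2 none (some (-1)))) (M, r))
      = (M ++ (List.range l.length).map (fun k => pvSh^[k+1] r), pvSh^[l.length] r) := by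
  induction l generalizing M r with
  | nil => simp
  | cons a t ih =>
    simp only [List.foldl_cons, List.length_cons]
    rw [ih (M ++ [(0 : Int) :: PySem.List.slice r none (some (-1))]) _]
    have hsh : (0 : Int) :: PySem.List.slice r none (some (-1)) = pvSh r := rfl
    rw [hsh]
    simp only [Prod.mk.injEq]
    constructor
    · rw [List.range_succ_eq_map, List.map_cons, List.map_map]
      simp only [Function.comp_def, Function.iterate_succ_apply]
      simp [List.append_assoc]
    · rw [Function.iterate_succ_apply]

-- one rotation moves the diagonal one place right
theorem pvSh_row (n i : Nat) (h : i + 1 < n) : pvSh (pvRow n i) = pvRow n (i+1) := by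
  rw [pvSh_eq]
  apply List.ext_getElem
  · simp [pvRow]; omega
  · intro k hk hk'
    simp only [pvRow, List.length_cons, List.length_dropLast, List.length_set,
      List.length_replicate] at hk hk'
    rcases k with _ | k
    · simp only [List.getElem_cons_zero, pvRow, List.getElem_set,
        List.getElem_replicate]
      rw [if_neg (by omega)]
    · simp only [List.getElem_cons_succ, List.getElem_dropLast, pvRow,
        List.getElem_set, List.getElem_replicate]
      by_cases hik : i = k
      · rw [if_pos hik, if_pos (by omega)]
      · rw [if_neg hik, if_neg (by omega)]

theorem pvSh_iter (n i : Nat) (hn : 0 < n) (hi : i < n) :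
    pvSh^[i] ((1 : Int) :: List.replicate (n - 1) 0) = pvRow n i := by
  induction i with
  | zero =>
    simp only [Function.iterate_zero, id_eq, pvRow]
    cases n with
    | zero => omega
    | succ m => simp [List.replicate_succ]
  | succ j ih =>
    rw [Function.iterate_succ_apply', ih (by omega)]
    exact pvSh_row n j hi

-- A's inner loop over j produces exactly the canonical row, for any i in range.
theorem row_eq (size i : Int) (h0 : 0 ≤ i) (_h1 : i < size) :
    (PySem.List.pyRange 0 size 1).foldl (fun row j =>
      row ++ [if i == j then (1 : Int) else 0]) []
      = pvRow size.toNat i.toNat := by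
  rw [PySem.List.foldl_append_singleton_eq_map, List.nil_append,
      PySem.List.pyRange_one]
  apply List.ext_getElem
  · simp [pvRow]
  · intro k hk hk'
    simp only [pvRow, List.getElem_map, List.getElem_range, List.getElem_set,
      List.getElem_replicate, zero_add] at *
    have hik : i.toNat = k ↔ i = (k : Int) := by omega
    by_cases hc : i = (k : Int)
    · simp [hc]
    · simp [hik, hc, beq_iff_eq]

-- A as a map of canonical rows
theorem a_eq (size : Int) :
    create_identity_matrix size
      = (List.range size.toNat).map (fun i => pvRow size.toNat i) := by
  unfold create_identity_matrix
  rw [PySem.List.foldl_append_singleton_eq_map, List.nil_append]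
  have h1 : (PySem.List.pyRange 0 size 1).map (fun i =>
      (PySem.List.pyRange 0 size 1).foldl (fun row j =>
        row ++ [if i == j then (1 : Int) else 0]) [])
      = (PySem.List.pyRange 0 size 1).map (fun i => pvRow size.toNat i.toNat) := by
    apply List.map_congr_left
    intro i hi
    rw [PySem.List.mem_pyRange_one] at hi
    exact row_eq size i hi.1 hi.2
  rw [h1, PySem.List.pyRange_one, List.map_map]
  simp only [sub_zero]
  apply List.map_congr_left
  intro k hk
  simp

theorem create_identity_matrix_eq (size : Int) :
    create_identity_matrix size = create_identity_matrix_alt size := by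
  by_cases hs : size ≤ 0
  · rw [a_eq]
    unfold create_identity_matrix_alt
    have h : size.toNat = 0 := by omega
    simp [hs, h]
  · rw [a_eq]
    unfold create_identity_matrix_alt
    rw [if_neg hs]
    simp only
    rw [pvFold_sh]
    simp only [PySem.List.length_pyRange_one, sub_zero]
    have hn0 : 0 < size.toNat := by omega
    have hsn : (size - 1).toNat = size.toNat - 1 := by omega
    rw [hsn]
    have hrange : List.range size.toNat
        = 0 :: (List.range (size.toNat - 1)).map (· + 1) := by
      obtain ⟨m, hm⟩ : ∃ m, size.toNat = m + 1 := ⟨size.toNat - 1, by omega⟩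
      rw [hm]
      simp [List.range_succ_eq_map]
    rw [hrange, List.map_cons, List.map_map, List.singleton_append]
    congr 1
    · rw [← pvSh_iter size.toNat 0 hn0 hn0]
      simp
    · apply List.map_congr_left
      intro k hk
      rw [List.mem_range] at hk
      simp only [Function.comp_def]
      rw [← pvSh_iter size.toNat (k+1) hn0 (by omega)]

-- ===== VERDICT (by name: the statement is the Claim_ definition above) =====
theorem create_identity_matrix_spec : Claim_equal_create_identity_matrix := by
  intro size _
  unfold Spec_create_identity_matrix
  exact create_identity_matrix_eq size
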